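-- pv_equiv track=rewrite | github.com/2025K-PaaS/Backend | services/point_service.py | _calc_level_info
-- ===== SOURCE A (Python) =====
-- from typing import Tuple, Dict, Any
--
-- _LEVEL_TABLE = [
--     (0,    "새싹 탐험가"),      # Lv1
--     (100,  "씨앗 수호자"),      # Lv2
--     (300,  "지구 지킴이"),      # Lv3
--     (600,  "순환 장인"),        # Lv4
--     (1000, "지구 영웅"),        # Lv5
-- ]
--
-- def _calc_level_info(balance: int) -> Tuple[int, str]:
--     chosen_level_idx = 0
--     for idx, (min_pt, _title) in enumerate(_LEVEL_TABLE):
--         if balance >= min_pt: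
--             chosen_level_idx = idx
--         else:
--             break
--
--     _, title = _LEVEL_TABLE[chosen_level_idx]
--     level_number = chosen_level_idx + 1
--     return level_number, title
-- ===== SOURCE B (Python) =====
-- from typing import Tuple, Dict, Any
--
-- _LEVEL_TABLE = [
--     (0,    "새싹 탐험가"),      # Lv1
--     (100,  "씨앗 수호자"),      # Lv2
--     (300,  "지구 지킴이"),      # Lv3
--     (600,  "순환 장인"),        # Lv4
--     (1000, "지구 영웅"),        # Lv5
-- ]
--
-- def _calc_level_info(balance: int) -> Tuple[int, str]:
--     # binary search (bisect_right by hand) over the sorted thresholds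
--     thresholds = [t for t, _ in _LEVEL_TABLE]
--     lo, hi = 0, len(thresholds)
--     while lo < hi:
--         mid = (lo + hi) // 2
--         if balance >= thresholds[mid]:
--             lo = mid + 1
--         else:
--             hi = mid
--     idx = max(lo - 1, 0)
--     return idx + 1, _LEVEL_TABLE[idx][1]
-- ===== Notes on version B (the rewrite author's own statement) =====
-- stated objective: alternative
-- what changed: Replaces A's linear scan-and-break over the level table with a hand-rolled bisect_right binary search over the precomputed threshold list plus a clamp to 0.
import Mathlib
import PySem

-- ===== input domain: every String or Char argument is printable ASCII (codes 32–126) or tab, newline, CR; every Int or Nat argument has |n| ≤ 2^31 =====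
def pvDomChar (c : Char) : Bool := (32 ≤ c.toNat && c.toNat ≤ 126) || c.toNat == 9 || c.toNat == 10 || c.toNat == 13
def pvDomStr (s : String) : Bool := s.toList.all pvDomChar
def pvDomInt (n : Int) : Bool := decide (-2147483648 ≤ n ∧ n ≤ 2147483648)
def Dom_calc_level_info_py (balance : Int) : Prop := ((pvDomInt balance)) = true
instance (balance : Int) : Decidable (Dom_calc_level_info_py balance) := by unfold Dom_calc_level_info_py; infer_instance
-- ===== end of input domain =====

-- B replaces A's linear scan-and-break with a hand-rolled bisect_right binary search
-- over the thresholds plus a clamp (objective: alternative/idiomatic lookup).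

def pvLevelTable : List (Int × String) :=
  [(0, "새싹 탐험가"), (100, "씨앗 수호자"), (300, "지구 지킴이"), (600, "순환 장인"), (1000, "지구 영웅")]

-- ===== PORT A =====
-- the for-loop with break, over enumerate(_LEVEL_TABLE), carrying chosen_level_idx
def pvALoop (balance : Int) : List (Int × (Int × String)) → Int → Int
  | [], chosen => chosen
  | (idx, (minPt, _)) :: rest, chosen =>
      if balance ≥ minPt then pvALoop balance rest idx else chosen

def calc_level_info_py (balance : Int) : Int × String :=
  let chosen := pvALoop balance (PySem.List.enumerate pvLevelTable) 0
  let title := ((PySem.List.pyGet? pvLevelTable chosen).getD (0, "")).2  -- index always in range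
  (chosen + 1, title)

-- ===== PORT B =====
-- bisect_right by binary search: the while lo < hi loop, termination on hi - lo
def pvBSearch (balance : Int) (ts : List Int) (lo hi : Nat) : Nat :=
  if h : lo < hi then
    let mid := (lo + hi) / 2
    if balance ≥ ts.getD mid 0 then pvBSearch balance ts (mid + 1) hi
    else pvBSearch balance ts lo mid
  else lo
termination_by hi - lo
decreasing_by all_goals omega

def calc_level_info_py_alt (balance : Int) : Int × String :=
  let thresholds := pvLevelTable.map Prod.fst
  let lo := pvBSearch balance thresholds 0 thresholds.length
  let idx : Int := max ((lo : Int) - 1) 0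
  let title := ((PySem.List.pyGet? pvLevelTable idx).getD (0, "")).2  -- index always in range
  (idx + 1, title)

-- ===== PRECONDITION & SPEC =====
def Spec_calc_level_info_py (balance : Int) (out : Int × String) : Prop := out = calc_level_info_py_alt balance
instance (balance : Int) (out : Int × String) : Decidable (Spec_calc_level_info_py balance out) := by unfold Spec_calc_level_info_py; infer_instance

-- ===== CLAIM (what is proved, stated in full; the proofs are below) =====
def Claim_equal_calc_level_info_py : Prop := ∀ (balance : Int), Dom_calc_level_info_py balance → Spec_calc_level_info_py balance (calc_level_info_py balance)

-- ===== LEMMAS AND PROOFS =====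

theorem pv_equal (b : Int) : calc_level_info_py b = calc_level_info_py_alt b := by
  dsimp only [calc_level_info_py, calc_level_info_py_alt, pvLevelTable,
    List.map_cons, List.map_nil, List.length_cons, List.length_nil]
  by_cases h0 : (0:Int) ≤ b <;> by_cases h1 : (100:Int) ≤ b <;> by_cases h2 : (300:Int) ≤ b <;>
    by_cases h3 : (600:Int) ≤ b <;> by_cases h4 : (1000:Int) ≤ b <;>
  first
    | omega
    | simp [pvBSearch.eq_def, pvALoop, PySem.List.enumerate_cons, PySem.List.enumerate_nil,
        PySem.List.pyGet?, PySem.List.pyIdx?, h0, h1, h2, h3, h4]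

-- ===== VERDICT (by name: the statement is the Claim_ definition above) =====
theorem calc_level_info_py_spec : Claim_equal_calc_level_info_py := by
  intro b _
  exact pv_equal b
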